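-- pv_equiv track=rewrite | github.com/maksympash-code/Algorithms_and_data_structures | HW_13/t13_13.py | count_ways_stack
-- ===== SOURCE A (Python) =====
-- def count_ways_stack(pattern, i, stack):
--     if i == len(pattern):
--         return 1 if not stack else 0
--
--     ways = 0
--     char = pattern[i]
--
--     if char == '(':
--         stack.append('(')
--         ways = count_ways_stack(pattern, i + 1, stack)
--         stack.pop()
--     elif char == ')':
--         if not stack:
--             return 0
--         top = stack.pop()
--         ways = count_ways_stack(pattern, i + 1, stack)
--         stack.append(top)
--     elif char == '?':
--         stack.append('(')
--         ways = count_ways_stack(pattern, i + 1, stack)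
--         stack.pop()
--         if stack:
--             top = stack.pop()
--             ways += count_ways_stack(pattern, i + 1, stack)
--             stack.append(top)
--     return ways % 301907
-- ===== SOURCE B (Python) =====
-- def count_ways_stack(pattern, i, stack):
--     MOD = 301907
--     n = len(pattern)
--     d0 = len(stack)
--     steps = n - i if n - i > 0 else 0
--     size = d0 + steps + 1
--     dp = [1] + [0] * (size - 1)   # dp[d] = ways to finish from position n at depth d
--     for j in range(n - 1, i - 1, -1):
--         c = pattern[j]
--         dp = [((dp[d + 1] if (c == '(' or c == '?') and d + 1 < size else 0)
--                + (dp[d - 1] if (c == ')' or c == '?') and d > 0 else 0)) % MOD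
--               for d in range(size)]
--         if all(w == 0 for w in dp):
--             break                 # no reachable state left: every earlier position counts 0
--     return dp[d0] % MOD
-- ===== Notes on version B (the rewrite author's own statement) =====
-- stated objective: alternative
-- what changed: Replaced the branching recursion over an explicit stack by a bottom-up DP over (position, open-paren depth) with an early exit once no reachable state remains: the stack only ever acts as a depth counter, so B keeps one vector of counts per depth and sweeps the pattern once from the end.
import Mathlib
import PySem

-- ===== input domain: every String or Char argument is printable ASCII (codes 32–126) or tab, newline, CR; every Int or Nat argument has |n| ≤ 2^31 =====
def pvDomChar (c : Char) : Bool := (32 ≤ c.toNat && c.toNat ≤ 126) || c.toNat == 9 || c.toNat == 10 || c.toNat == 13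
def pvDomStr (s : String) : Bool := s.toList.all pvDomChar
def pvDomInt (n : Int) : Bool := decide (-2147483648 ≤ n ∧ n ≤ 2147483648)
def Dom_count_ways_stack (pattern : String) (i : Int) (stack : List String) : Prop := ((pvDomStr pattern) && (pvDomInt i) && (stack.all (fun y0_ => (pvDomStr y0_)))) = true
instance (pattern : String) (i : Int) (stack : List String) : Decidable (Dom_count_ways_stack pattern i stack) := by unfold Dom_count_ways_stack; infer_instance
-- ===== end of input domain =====

-- B replaces A's exponential branching recursion over a stack by a backward DP over
-- (position, open-paren depth); A mutates `stack` only transiently (it restores it before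
-- returning), so equal return values are the whole observable behaviour.

-- helper lemma cited by the ports' termination proofs
theorem pv_pyGet?_lt_of_some {s : List Char} {i : Int} {c : Char}
    (h : PySem.List.pyGet? s i = some c) : i < (s.length : Int) := by
  by_contra hge
  unfold PySem.List.pyGet? PySem.List.pyIdx? at h
  rw [if_pos (by omega), if_neg (by omega)] at h
  simp at h

-- ===== PORT A =====
def count_ways_stack (pattern : String) (i : Int) (stack : List String) : Int :=
  if i = PySem.Str.len pattern then (if stack = [] then 1 else 0)
  else
    match h : PySem.Str.pyGet? pattern i with
    | none => 0      -- Python raises IndexError here; excluded by Pre_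
    | some c =>
      if c = '(' then
        -- stack.append('('); recurse; stack.pop()
        PySem.Int.mod (count_ways_stack pattern (i + 1) (stack ++ ["("])) 301907
      else if c = ')' then
        if stack = [] then 0
        else
          -- top = stack.pop(); recurse; stack.append(top)
          PySem.Int.mod (count_ways_stack pattern (i + 1) stack.dropLast) 301907
      else if c = '?' then
        -- push-'(' branch, then (if the original stack is nonempty) pop branch
        PySem.Int.mod
          (count_ways_stack pattern (i + 1) (stack ++ ["("]) +
            (if stack = [] then 0 else count_ways_stack pattern (i + 1) stack.dropLast)) 301907
      else
        PySem.Int.mod 0 301907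
termination_by (PySem.Str.len pattern - i).toNat
decreasing_by
  all_goals
  · have h2 := pv_pyGet?_lt_of_some (s := pattern.toList)
      (by simpa [PySem.Str.pyGet?, PySem.Chars.pyGet?] using h)
    have h3 := PySem.Str.len_eq pattern
    omega

-- ===== PORT B =====
-- one step of the backward DP: the list comprehension of Source B
def altStep (c : Char) (size : Nat) (dp : List Int) : List Int :=
  (List.range size).map (fun d =>
    PySem.Int.mod
      ((if (c = '(' ∨ c = '?') ∧ d + 1 < size then dp.getD (d + 1) 0 else 0) +
       (if (c = ')' ∨ c = '?') ∧ 0 < d then dp.getD (d - 1) 0 else 0)) 301907)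

-- the 'for j in range(n - 1, i - 1, -1)' loop of Source B, with its early 'break'
def altLoop (pattern : String) (i : Int) (size : Nat) (j : Int) (dp : List Int) : List Int :=
  if j < i then dp
  else
    let dp' := altStep ((PySem.Str.pyGet? pattern j).getD ' ') size dp
    if dp'.all (fun w => w == 0) then dp'   -- break: no reachable state left
    else altLoop pattern i size (j - 1) dp'
termination_by (j - i + 1).toNat
decreasing_by omega

def count_ways_stack_alt (pattern : String) (i : Int) (stack : List String) : Int :=
  let n : Int := PySem.Str.len pattern
  let d0 : Nat := stack.length
  let size : Nat := d0 + (n - i).toNat + 1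
  let dp : List Int := 1 :: List.replicate (size - 1) 0
  let dp2 := altLoop pattern i size (n - 1) dp
  PySem.Int.mod (dp2.getD d0 0) 301907

-- ===== PRECONDITION & SPEC =====
-- Pre_ excludes exactly the inputs on which Python's A raises IndexError (pattern[i] with
-- i < -len(pattern) or i > len(pattern)).
def Pre_count_ways_stack (pattern : String) (i : Int) (stack : List String) : Prop :=
  -(PySem.Str.len pattern) ≤ i ∧ i ≤ PySem.Str.len pattern
instance (pattern : String) (i : Int) (stack : List String) : Decidable (Pre_count_ways_stack pattern i stack) := by unfold Pre_count_ways_stack; infer_instance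

def pvWitness_count_ways_stack : String × Int × List String := ("?()?", 0, [])

def Spec_count_ways_stack (pattern : String) (i : Int) (stack : List String) (out : Int) : Prop := out = count_ways_stack_alt pattern i stack
instance (pattern : String) (i : Int) (stack : List String) (out : Int) : Decidable (Spec_count_ways_stack pattern i stack out) := by unfold Spec_count_ways_stack; infer_instance

-- ===== CLAIM (what is proved, stated in full; the proofs are below) =====
def Claim_equal_count_ways_stack : Prop := ∀ (pattern : String) (i : Int) (stack : List String), Dom_count_ways_stack pattern i stack → Pre_count_ways_stack pattern i stack → Spec_count_ways_stack pattern i stack (count_ways_stack pattern i stack)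

-- ===== LEMMAS AND PROOFS =====

theorem pv_pyGet?_none_of_ge {s : List Char} {i : Int} (h : (s.length : Int) ≤ i) :
    PySem.List.pyGet? s i = none := by
  unfold PySem.List.pyGet? PySem.List.pyIdx?
  rw [if_pos (by omega), if_neg (by omega)]
  rfl

theorem pv_strGet?_none_of_ge {s : String} {i : Int} (h : PySem.Str.len s ≤ i) :
    PySem.Str.pyGet? s i = none := by
  have h3 := PySem.Str.len_eq s
  simpa [PySem.Str.pyGet?, PySem.Chars.pyGet?] using
    pv_pyGet?_none_of_ge (s := s.toList) (i := i) (by omega)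

-- the mathematical kernel of A: its recursion with the stack replaced by its length
def W (pattern : String) (j : Int) (d : Nat) : Int :=
  if j = PySem.Str.len pattern then (if d = 0 then 1 else 0)
  else
    match h : PySem.Str.pyGet? pattern j with
    | none => 0
    | some c =>
      if c = '(' then PySem.Int.mod (W pattern (j + 1) (d + 1)) 301907
      else if c = ')' then
        if d = 0 then 0 else PySem.Int.mod (W pattern (j + 1) (d - 1)) 301907
      else if c = '?' then
        PySem.Int.mod
          (W pattern (j + 1) (d + 1) + (if d = 0 then 0 else W pattern (j + 1) (d - 1))) 301907
      else 0
termination_by (PySem.Str.len pattern - j).toNat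
decreasing_by
  all_goals
  · have h2 := pv_pyGet?_lt_of_some (s := pattern.toList)
      (by simpa [PySem.Str.pyGet?, PySem.Chars.pyGet?] using h)
    have h3 := PySem.Str.len_eq pattern
    omega

-- equation lemmas for W
theorem W_base {pattern : String} {j : Int} (d : Nat) (hj : j = PySem.Str.len pattern) :
    W pattern j d = (if d = 0 then 1 else 0) := by
  rw [W, if_pos hj]

theorem W_none {pattern : String} {j : Int} (d : Nat)
    (hj : j ≠ PySem.Str.len pattern) (hg : PySem.Str.pyGet? pattern j = none) :
    W pattern j d = 0 := by
  rw [W, if_neg hj]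
  split
  · rfl
  · rename_i c' h; rw [h] at hg; cases hg

theorem W_some {pattern : String} {j : Int} {c : Char} (d : Nat)
    (hj : j ≠ PySem.Str.len pattern) (hg : PySem.Str.pyGet? pattern j = some c) :
    W pattern j d =
      (if c = '(' then PySem.Int.mod (W pattern (j + 1) (d + 1)) 301907
      else if c = ')' then
        if d = 0 then 0 else PySem.Int.mod (W pattern (j + 1) (d - 1)) 301907
      else if c = '?' then
        PySem.Int.mod
          (W pattern (j + 1) (d + 1) + (if d = 0 then 0 else W pattern (j + 1) (d - 1))) 301907
      else 0) := by
  rw [W, if_neg hj]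
  split
  · rename_i h; rw [h] at hg; cases hg
  · rename_i c' h; rw [h] at hg; cases hg; rfl

-- equation lemmas for port A
theorem A_base {pattern : String} {j : Int} (stack : List String)
    (hj : j = PySem.Str.len pattern) :
    count_ways_stack pattern j stack = (if stack = [] then 1 else 0) := by
  rw [count_ways_stack, if_pos hj]

theorem A_none {pattern : String} {j : Int} (stack : List String)
    (hj : j ≠ PySem.Str.len pattern) (hg : PySem.Str.pyGet? pattern j = none) :
    count_ways_stack pattern j stack = 0 := by
  rw [count_ways_stack, if_neg hj]
  split
  · rfl
  · rename_i c' h; rw [h] at hg; cases hg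

theorem A_some {pattern : String} {j : Int} {c : Char} (stack : List String)
    (hj : j ≠ PySem.Str.len pattern) (hg : PySem.Str.pyGet? pattern j = some c) :
    count_ways_stack pattern j stack =
      (if c = '(' then
        PySem.Int.mod (count_ways_stack pattern (j + 1) (stack ++ ["("])) 301907
      else if c = ')' then
        if stack = [] then 0
        else PySem.Int.mod (count_ways_stack pattern (j + 1) stack.dropLast) 301907
      else if c = '?' then
        PySem.Int.mod
          (count_ways_stack pattern (j + 1) (stack ++ ["("]) +
            (if stack = [] then 0 else count_ways_stack pattern (j + 1) stack.dropLast)) 301907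
      else PySem.Int.mod 0 301907) := by
  rw [count_ways_stack, if_neg hj]
  split
  · rename_i h; rw [h] at hg; cases hg
  · rename_i c' h; rw [h] at hg; cases hg; rfl

-- A's result depends on the stack only through its length
theorem A_eq_W (pattern : String) :
    ∀ (k : Nat) (j : Int) (stack : List String),
      (PySem.Str.len pattern - j).toNat ≤ k →
      count_ways_stack pattern j stack = W pattern j stack.length := by
  have h3 := PySem.Str.len_eq pattern
  intro k
  induction k with
  | zero =>
    intro j stack hk
    by_cases hj : j = PySem.Str.len pattern
    · rw [A_base stack hj, W_base _ hj]
      cases stack <;> simp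
    · rw [A_none stack hj (pv_strGet?_none_of_ge (by omega)),
          W_none _ hj (pv_strGet?_none_of_ge (by omega))]
  | succ k ih =>
    intro j stack hk
    by_cases hj : j = PySem.Str.len pattern
    · rw [A_base stack hj, W_base _ hj]
      cases stack <;> simp
    · cases hg : PySem.Str.pyGet? pattern j with
      | none => rw [A_none stack hj hg, W_none _ hj hg]
      | some c =>
        have hlt : j < PySem.Str.len pattern := by
          have := pv_pyGet?_lt_of_some (s := pattern.toList)
            (by simpa [PySem.Str.pyGet?, PySem.Chars.pyGet?] using hg)
          omega
        have hk' : (PySem.Str.len pattern - (j + 1)).toNat ≤ k := by omega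
        rw [A_some stack hj hg, W_some _ hj hg]
        have hne : stack ≠ [] → ¬ stack.length = 0 := by
          intro h; simpa [List.length_eq_zero_iff] using h
        by_cases h1 : c = '('
        · rw [if_pos h1, if_pos h1, ih (j + 1) (stack ++ ["("]) hk']
          simp
        · rw [if_neg h1, if_neg h1]
          by_cases h2 : c = ')'
          · rw [if_pos h2, if_pos h2]
            by_cases hs : stack = []
            · simp [hs]
            · rw [if_neg hs, if_neg (hne hs), ih (j + 1) stack.dropLast hk']
              simp
          · rw [if_neg h2, if_neg h2]
            by_cases hq : c = '?'
            · rw [if_pos hq, if_pos hq, ih (j + 1) (stack ++ ["("]) hk']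
              by_cases hs : stack = []
              · simp [hs]
              · rw [if_neg hs, if_neg (hne hs), ih (j + 1) stack.dropLast hk']
                simp
            · rw [if_neg hq, if_neg hq]
              decide

theorem W_range (pattern : String) :
    ∀ (k : Nat) (j : Int) (d : Nat),
      (PySem.Str.len pattern - j).toNat ≤ k →
      0 ≤ W pattern j d ∧ W pattern j d < 301907 := by
  have h3 := PySem.Str.len_eq pattern
  have hmod : ∀ a : Int, 0 ≤ PySem.Int.mod a 301907 ∧ PySem.Int.mod a 301907 < 301907 :=
    fun a => ⟨PySem.Int.mod_nonneg a (by norm_num), PySem.Int.mod_lt a (by norm_num)⟩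
  intro k
  induction k with
  | zero =>
    intro j d hk
    by_cases hj : j = PySem.Str.len pattern
    · rw [W_base _ hj]; split <;> norm_num
    · rw [W_none _ hj (pv_strGet?_none_of_ge (by omega))]; norm_num
  | succ k ih =>
    intro j d hk
    by_cases hj : j = PySem.Str.len pattern
    · rw [W_base _ hj]; split <;> norm_num
    · cases hg : PySem.Str.pyGet? pattern j with
      | none => rw [W_none _ hj hg]; norm_num
      | some c =>
        rw [W_some _ hj hg]
        split_ifs <;> first | exact hmod _ | norm_num

-- a depth larger than the number of remaining characters can never be emptied
theorem W_zero (pattern : String) :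
    ∀ (k : Nat) (j : Int) (d : Nat),
      (PySem.Str.len pattern - j).toNat ≤ k →
      PySem.Str.len pattern - j < (d : Int) →
      W pattern j d = 0 := by
  have h3 := PySem.Str.len_eq pattern
  intro k
  induction k with
  | zero =>
    intro j d hk hd
    by_cases hj : j = PySem.Str.len pattern
    · rw [W_base _ hj, if_neg (by omega)]
    · rw [W_none _ hj (pv_strGet?_none_of_ge (by omega))]
  | succ k ih =>
    intro j d hk hd
    by_cases hj : j = PySem.Str.len pattern
    · rw [W_base _ hj, if_neg (by omega)]
    · cases hg : PySem.Str.pyGet? pattern j with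
      | none => rw [W_none _ hj hg]
      | some c =>
        have hlt : j < PySem.Str.len pattern := by
          have := pv_pyGet?_lt_of_some (s := pattern.toList)
            (by simpa [PySem.Str.pyGet?, PySem.Chars.pyGet?] using hg)
          omega
        have hk' : (PySem.Str.len pattern - (j + 1)).toNat ≤ k := by omega
        have hup : W pattern (j + 1) (d + 1) = 0 := ih (j + 1) (d + 1) hk' (by omega)
        have hdn : W pattern (j + 1) (d - 1) = 0 := ih (j + 1) (d - 1) hk' (by omega)
        have hd0 : ¬ d = 0 := by omega
        rw [W_some _ hj hg]
        split_ifs <;> simp_all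

theorem getD_altStep (c : Char) (size : Nat) (dp : List Int) (d : Nat) (hd : d < size) :
    (altStep c size dp).getD d 0 =
      PySem.Int.mod
        ((if (c = '(' ∨ c = '?') ∧ d + 1 < size then dp.getD (d + 1) 0 else 0) +
         (if (c = ')' ∨ c = '?') ∧ 0 < d then dp.getD (d - 1) 0 else 0)) 301907 := by
  unfold altStep
  rw [List.getD_eq_getElem?_getD, List.getElem?_map, List.getElem?_range hd]
  rfl

-- one DP step computes W at position j from W at position j + 1
theorem altStep_correct (pattern : String) (i : Int) (size : Nat) (j : Int) (dp : List Int)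
    (hij : i ≤ j) (hjn : j ≤ PySem.Str.len pattern - 1)
    (hsz : PySem.Str.len pattern - i < (size : Int))
    (hdp : ∀ d < size, dp.getD d 0 = W pattern (j + 1) d) :
    ∀ d < size, (altStep ((PySem.Str.pyGet? pattern j).getD ' ') size dp).getD d 0
      = W pattern j d := by
  intro d hd
  have hj : j ≠ PySem.Str.len pattern := by omega
  rw [getD_altStep _ _ _ _ hd]
  have hup : ∀ _ : d + 1 < size, dp.getD (d + 1) 0 = W pattern (j + 1) (d + 1) :=
    fun h => hdp (d + 1) h
  have hupz : ∀ _ : ¬ d + 1 < size, W pattern (j + 1) (d + 1) = 0 := by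
    intro h
    exact W_zero pattern (PySem.Str.len pattern - (j + 1)).toNat (j + 1) (d + 1) le_rfl
      (by omega)
  have hdn : ∀ _ : 0 < d, dp.getD (d - 1) 0 = W pattern (j + 1) (d - 1) :=
    fun h => hdp (d - 1) (by omega)
  cases hg : PySem.Str.pyGet? pattern j with
  | none =>
    rw [W_none d hj hg]
    simp
  | some c =>
    rw [W_some d hj hg]
    simp only [Option.getD_some]
    by_cases h1 : c = '('
    · rw [if_pos h1]
      by_cases h2 : d + 1 < size
      · rw [if_pos ⟨Or.inl h1, h2⟩, if_neg (by simp [h1]), hup h2, add_zero]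
      · rw [if_neg (fun h => h2 h.2), if_neg (by simp [h1]), hupz h2]
        decide
    · rw [if_neg h1]
      by_cases h2 : c = ')'
      · rw [if_pos h2, if_neg (by simp [h2])]
        by_cases hd0 : d = 0
        · rw [if_neg (fun h => by omega), if_pos hd0]
          decide
        · rw [if_pos ⟨Or.inl h2, by omega⟩, hdn (by omega), if_neg hd0, zero_add]
      · rw [if_neg h2]
        by_cases hq : c = '?'
        · rw [if_pos hq]
          by_cases h4 : d + 1 < size
          · rw [if_pos ⟨Or.inr hq, h4⟩, hup h4]
            by_cases hd0 : d = 0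
            · rw [if_neg (fun h => by omega), if_pos hd0]
            · rw [if_pos ⟨Or.inr hq, by omega⟩, hdn (by omega), if_neg hd0]
          · rw [if_neg (fun h => h4 h.2), hupz h4]
            by_cases hd0 : d = 0
            · rw [if_neg (fun h => by omega), if_pos hd0]
            · rw [if_pos ⟨Or.inr hq, by omega⟩, hdn (by omega), if_neg hd0]
        · rw [if_neg hq, if_neg (by simp [h1, hq]), if_neg (by simp [h2, hq])]
          decide

theorem length_altStep (c : Char) (size : Nat) (dp : List Int) :
    (altStep c size dp).length = size := by
  unfold altStep
  rw [List.length_map, List.length_range]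

-- once every count below `size` is 0 at position j, every earlier position also counts 0
theorem W_dead (pattern : String) (i : Int) (size : Nat) (j : Int)
    (hsz : PySem.Str.len pattern - i < (size : Int)) (hjn : j ≤ PySem.Str.len pattern - 1)
    (h0 : ∀ d < size, W pattern (j + 1) d = 0) :
    ∀ (k : Nat) (m : Int), (j + 1 - m).toNat ≤ k → i ≤ m → m ≤ j + 1 →
      ∀ d < size, W pattern m d = 0 := by
  intro k
  induction k with
  | zero =>
    intro m hk h1 h2 d hd
    have : m = j + 1 := by omega
    subst this
    exact h0 d hd
  | succ k ih =>
    intro m hk h1 h2 d hd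
    by_cases hm : m = j + 1
    · subst hm; exact h0 d hd
    · have hmn : m ≠ PySem.Str.len pattern := by omega
      cases hg : PySem.Str.pyGet? pattern m with
      | none => rw [W_none d hmn hg]
      | some c =>
        have hup : W pattern (m + 1) (d + 1) = 0 := by
          by_cases h4 : d + 1 < size
          · exact ih (m + 1) (by omega) (by omega) (by omega) (d + 1) h4
          · exact W_zero pattern (PySem.Str.len pattern - (m + 1)).toNat (m + 1) (d + 1)
              le_rfl (by omega)
        have hdn : W pattern (m + 1) (d - 1) = 0 :=
          ih (m + 1) (by omega) (by omega) (by omega) (d - 1) (by omega)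
        rw [W_some d hmn hg]
        split_ifs <;> simp_all

-- the backward loop turns the table for position n into the table for position i
theorem altLoop_correct (pattern : String) (i : Int) (size : Nat)
    (hsz : PySem.Str.len pattern - i < (size : Int)) :
    ∀ (k : Nat) (j : Int) (dp : List Int),
      (j - i + 1).toNat ≤ k → i - 1 ≤ j → j ≤ PySem.Str.len pattern - 1 →
      (∀ d < size, dp.getD d 0 = W pattern (j + 1) d) →
      ∀ d < size, (altLoop pattern i size j dp).getD d 0 = W pattern i d := by
  intro k
  induction k with
  | zero =>
    intro j dp hk h1 h2 hdp d hd
    have hj : j = i - 1 := by omega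
    rw [altLoop, if_pos (by omega)]
    have := hdp d hd
    rwa [hj, show i - 1 + 1 = i by ring] at this
  | succ k ih =>
    intro j dp hk h1 h2 hdp d hd
    rw [altLoop]
    by_cases hj : j < i
    · rw [if_pos hj]
      have hj' : j = i - 1 := by omega
      have := hdp d hd
      rwa [hj', show i - 1 + 1 = i by ring] at this
    · rw [if_neg hj]
      have hstep : ∀ d' < size,
          (altStep ((PySem.Str.pyGet? pattern j).getD ' ') size dp).getD d' 0
            = W pattern j d' :=
        altStep_correct pattern i size j dp (by omega) h2 hsz hdp
      by_cases hall : (altStep ((PySem.Str.pyGet? pattern j).getD ' ') size dp).all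
          (fun w => w == 0) = true
      · rw [if_pos hall]
        -- break: the current table is all-zero, so W pattern i d = 0 as well
        have hz : ∀ d' < size,
            (altStep ((PySem.Str.pyGet? pattern j).getD ' ') size dp).getD d' 0 = 0 := by
          intro d' hd'
          have hlen : d' < (altStep ((PySem.Str.pyGet? pattern j).getD ' ') size dp).length := by
            rw [length_altStep]; exact hd'
          rw [List.getD_eq_getElem?_getD, List.getElem?_eq_getElem hlen]
          have := List.all_eq_true.mp hall _ (List.getElem_mem hlen)
          simpa using this
        have hWj : ∀ d' < size, W pattern ((j - 1) + 1) d' = 0 := by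
          intro d' hd'
          rw [show j - 1 + 1 = j by ring]
          rw [← hstep d' hd']
          exact hz d' hd'
        rw [hz d hd]
        exact (W_dead pattern i size (j - 1) hsz (by omega) hWj
          ((j - 1) + 1 - i).toNat i le_rfl le_rfl (by omega) d hd).symm
      · rw [if_neg hall]
        exact ih (j - 1) _ (by omega) (by omega) (by omega)
          (by
            intro d' hd'
            rw [show j - 1 + 1 = j by ring]
            exact hstep d' hd') d hd

-- the initial vector is the table for position n
theorem init_correct (pattern : String) (size : Nat) :
    ∀ d < size, ((1 : Int) :: List.replicate (size - 1) 0).getD d 0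
      = W pattern (PySem.Str.len pattern) d := by
  intro d _
  rw [W_base _ rfl]
  cases d with
  | zero => rfl
  | succ d' =>
    show (List.replicate (size - 1) (0 : Int)).getD d' 0 = _
    rw [List.getD_eq_getElem?_getD, List.getElem?_replicate]
    split <;> rfl

-- ===== VERDICT (by name: the statement is the Claim_ definition above) =====
theorem count_ways_stack_spec : Claim_equal_count_ways_stack := by
  intro pattern i stack _ hpre
  obtain ⟨hlo, hhi⟩ := hpre
  unfold Spec_count_ways_stack count_ways_stack_alt
  show count_ways_stack pattern i stack = PySem.Int.mod
    ((altLoop pattern i (stack.length + (PySem.Str.len pattern - i).toNat + 1)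
        (PySem.Str.len pattern - 1)
        (1 :: List.replicate ((stack.length + (PySem.Str.len pattern - i).toNat + 1) - 1) 0)).getD
      stack.length 0) 301907
  have hsz : PySem.Str.len pattern - i
      < ((stack.length + (PySem.Str.len pattern - i).toNat + 1 : Nat) : Int) := by
    push_cast; omega
  rw [altLoop_correct pattern i (stack.length + (PySem.Str.len pattern - i).toNat + 1) hsz
        (PySem.Str.len pattern - 1 - i + 1).toNat (PySem.Str.len pattern - 1)
        (1 :: List.replicate ((stack.length + (PySem.Str.len pattern - i).toNat + 1) - 1) 0)
        le_rfl (by omega) (by omega)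
        (by
          intro d hd
          rw [show PySem.Str.len pattern - 1 + 1 = PySem.Str.len pattern by ring]
          exact init_correct pattern _ d hd)
        stack.length (by omega),
      A_eq_W pattern (PySem.Str.len pattern - i).toNat i stack le_rfl]
  have hr := W_range pattern (PySem.Str.len pattern - i).toNat i stack.length le_rfl
  rw [PySem.Int.mod_eq_emod_of_pos (by norm_num : (0:Int) < 301907),
      Int.emod_eq_of_lt hr.1 hr.2]
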